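-- pv_equiv track=rewrite | github.com/jbooba/ABS-Auditor | abs_bot/leaderboard.py | _truncate_blocks
-- ===== SOURCE A (Python) =====
-- from typing import Any, Iterable
--
-- def _truncate_blocks(blocks: Iterable[Iterable[str]], limit: int) -> str:
--     active_blocks = [
--         [line for line in block if line]
--         for block in blocks
--     ]
--     active_blocks = [block for block in active_blocks if block]
--     text = "\n\n".join("\n".join(block) for block in active_blocks)
--     if len(text) <= limit:
--         return text
--
--     collapsed = [line for block in active_blocks for line in block]
--     text = "\n".join(collapsed)
--     if len(text) <= limit:
--         return text
--
--     if active_blocks and len(active_blocks) >= 3: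
--         condensed_blocks = active_blocks[:2]
--         text = "\n\n".join("\n".join(block) for block in condensed_blocks)
--         if len(text) <= limit:
--             return text
--
--     active_lines = list(collapsed)
--     while len("\n".join(active_lines)) > limit and len(active_lines) > 3:
--         active_lines.pop()
--
--     text = "\n".join(active_lines)
--     if len(text) <= limit:
--         return text
--     return text[: max(0, limit - 3)].rstrip() + "..."
-- ===== SOURCE B (Python) =====
-- from typing import Any, Iterable
--
-- def _truncate_blocks(blocks: Iterable[Iterable[str]], limit: int) -> str:
--     # Arithmetic over line lengths: no text is joined until the winning stage is known.
--     active = [blk for blk in ([ln for ln in block if ln] for block in blocks) if blk]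
--     lines = [ln for blk in active for ln in blk]
--     lens = [len(ln) for ln in lines]
--     n = len(lines)
--     nb = len(active)
--     total = sum(lens)
--
--     if (total + n + nb - 2 if nb else 0) <= limit:
--         return "\n\n".join("\n".join(blk) for blk in active)
--     if (total + n - 1 if n else 0) <= limit:
--         return "\n".join(lines)
--     if nb >= 3:
--         n2 = len(active[0]) + len(active[1])
--         if sum(lens[:n2]) + n2 <= limit:
--             return "\n".join(active[0]) + "\n\n" + "\n".join(active[1])
--
--     # prefix costs: cost(k) = len("\n".join(lines[:k])); nondecreasing, so the
--     # largest fitting prefix count is a takewhile over the running sums.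
--     k = 0
--     cost = 0
--     for L in lens:
--         c = cost + L if k == 0 else cost + 1 + L
--         if c > limit:
--             break
--         cost = c
--         k += 1
--     m = n if n <= 3 else max(k, 3)
--     text = "\n".join(lines[:m])
--     if len(text) <= limit:
--         return text
--     return text[: max(0, limit - 3)].rstrip() + "..."
-- ===== Notes on version B (the rewrite author's own statement) =====
-- stated objective: alternative
-- what changed: B replaces A's repeated full-text joins (A re-joins all remaining lines on every pop of its shrinking loop) by one arithmetic pass over line lengths: running prefix costs determine how many leading lines fit, and text is joined only once at the winning stage.
import Mathlib
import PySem

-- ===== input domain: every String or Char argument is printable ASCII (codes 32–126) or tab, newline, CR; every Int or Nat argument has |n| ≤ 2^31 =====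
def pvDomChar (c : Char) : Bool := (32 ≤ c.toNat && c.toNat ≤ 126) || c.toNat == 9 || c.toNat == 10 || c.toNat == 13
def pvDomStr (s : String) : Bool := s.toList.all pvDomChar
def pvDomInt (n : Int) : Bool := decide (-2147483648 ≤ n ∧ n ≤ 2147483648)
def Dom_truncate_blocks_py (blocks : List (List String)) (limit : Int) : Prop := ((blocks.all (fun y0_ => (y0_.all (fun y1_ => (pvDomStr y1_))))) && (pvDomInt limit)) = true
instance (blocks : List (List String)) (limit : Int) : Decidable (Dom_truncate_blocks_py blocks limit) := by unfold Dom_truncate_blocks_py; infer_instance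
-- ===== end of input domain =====

-- B replaces A's repeated full-text joins and end-popping by a single arithmetic pass over
-- line lengths (running prefix costs), joining text only once; objective: alternative algorithm.

-- ===== PORT A =====
-- A's while loop: pop the last line while the joined text is too long and > 3 lines remain
-- (list.pop() is dropLast here; the guard 3 < length keeps the list nonempty, so no IndexError)
def pvA_loop (limit : Int) (active_lines : List String) : List String :=
  if _h : limit < PySem.Str.len (PySem.Str.join "\n" active_lines) ∧ 3 < active_lines.length then
    pvA_loop limit active_lines.dropLast
  else
    active_lines
termination_by active_lines.length
decreasing_by
  simp only [List.length_dropLast]; omega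

def truncate_blocks_py (blocks : List (List String)) (limit : Int) : String :=
  let active_blocks := blocks.map (fun block => block.filter (fun line => line ≠ ""))
  let active_blocks := active_blocks.filter (fun block => block ≠ [])
  let text := PySem.Str.join "\n\n" (active_blocks.map (fun block => PySem.Str.join "\n" block))
  if PySem.Str.len text ≤ limit then text
  else
    let collapsed := active_blocks.flatMap (fun block => block)
    let text := PySem.Str.join "\n" collapsed
    if PySem.Str.len text ≤ limit then text
    else
      let condensed_blocks := PySem.List.slice active_blocks none (some 2)
      let text3 := PySem.Str.join "\n\n" (condensed_blocks.map (fun block => PySem.Str.join "\n" block))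
      if active_blocks ≠ [] ∧ 3 ≤ (active_blocks.length : Int) ∧ PySem.Str.len text3 ≤ limit then
        text3
      else
        let active_lines := pvA_loop limit collapsed
        let text := PySem.Str.join "\n" active_lines
        if PySem.Str.len text ≤ limit then text
        else PySem.Str.rstrip (PySem.Str.slice text none (some (max 0 (limit - 3)))) ++ "..."

-- ===== PORT B =====
-- B's for loop with break: running prefix cost, stops at the first overflowing line;
-- returns k, the number of leading lines whose "\n"-join fits within limit
def pvB_scan (limit : Int) : List Int → Nat → Int → Nat
  | [], k, _ => k
  | L :: rest, k, cost =>
    let c := if k = 0 then cost + L else cost + 1 + L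
    if limit < c then k else pvB_scan limit rest (k + 1) c

def truncate_blocks_py_alt (blocks : List (List String)) (limit : Int) : String :=
  let active := (blocks.map (fun block => block.filter (fun line => line ≠ ""))).filter (fun block => block ≠ [])
  let lines := active.flatMap (fun block => block)
  let lens := lines.map PySem.Str.len
  let n : Int := lines.length
  let nb : Int := active.length
  let total := lens.sum
  if (if nb ≠ 0 then total + n + nb - 2 else 0) ≤ limit then
    PySem.Str.join "\n\n" (active.map (fun block => PySem.Str.join "\n" block))
  else if (if n ≠ 0 then total + n - 1 else 0) ≤ limit then
    PySem.Str.join "\n" lines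
  else
    -- active[0] / active[1]: in range whenever the guard 3 ≤ nb below holds, so getD is exact
    let b0 := (PySem.List.pyGet? active 0).getD []
    let b1 := (PySem.List.pyGet? active 1).getD []
    let n2 : Nat := b0.length + b1.length
    if 3 ≤ nb ∧ (PySem.List.slice lens none (some (n2 : Int))).sum + (n2 : Int) ≤ limit then
      PySem.Str.join "\n" b0 ++ "\n\n" ++ PySem.Str.join "\n" b1
    else
      let k := pvB_scan limit lens 0 0
      let m : Int := if n ≤ 3 then n else max (k : Int) 3
      let text := PySem.Str.join "\n" (PySem.List.slice lines none (some m))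
      if PySem.Str.len text ≤ limit then text
      else PySem.Str.rstrip (PySem.Str.slice text none (some (max 0 (limit - 3)))) ++ "..."

-- ===== PRECONDITION & SPEC =====
def Spec_truncate_blocks_py (blocks : List (List String)) (limit : Int) (out : String) : Prop := out = truncate_blocks_py_alt blocks limit
instance (blocks : List (List String)) (limit : Int) (out : String) : Decidable (Spec_truncate_blocks_py blocks limit out) := by unfold Spec_truncate_blocks_py; infer_instance

-- ===== CLAIM (what is proved, stated in full; the proofs are below) =====
def Claim_equal_truncate_blocks_py : Prop := ∀ (blocks : List (List String)) (limit : Int), Dom_truncate_blocks_py blocks limit → Spec_truncate_blocks_py blocks limit (truncate_blocks_py blocks limit)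

-- ===== LEMMAS AND PROOFS =====

/-- length of the "\n"-join of the first k lines, as a function of the line lengths -/
def pvCost (lens : List Int) (k : Nat) : Int :=
  if k = 0 then 0 else (lens.take k).sum + (k : Int) - 1

theorem pvChars_join_len (sep : List Char) (ps : List (List Char)) (h : ps ≠ []) :
    ((PySem.Chars.join sep ps).length : Int)
      = (ps.map (fun p => (p.length : Int))).sum + (sep.length : Int) * ((ps.length : Int) - 1) := by
  induction ps with
  | nil => simp at h
  | cons p rest ih =>
    cases rest with
    | nil => simp [PySem.Chars.join_singleton]
    | cons q t =>
      rw [PySem.Chars.join_cons_cons]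
      have h2 := ih (by simp)
      simp only [List.length_append, List.map_cons, List.sum_cons, List.length_cons] at *
      push_cast at *
      linarith
theorem pvStr_join_len (sep : String) (ls : List String) (h : ls ≠ []) :
    PySem.Str.len (PySem.Str.join sep ls)
      = (ls.map PySem.Str.len).sum + (sep.toList.length : Int) * ((ls.length : Int) - 1) := by
  rw [PySem.Str.len_eq, PySem.Str.toList_join]
  have := pvChars_join_len sep.toList (ls.map String.toList) (by simpa using h)
  rw [this]
  simp only [List.map_map, List.length_map, Function.comp_def]
  rw [show (fun x : String => ((x.toList.length : Int))) = PySem.Str.len from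
    funext fun s => (PySem.Str.len_eq s).symm]

theorem pvStr_join_nil (sep : String) : PySem.Str.len (PySem.Str.join sep []) = 0 := by
  rw [PySem.Str.len_eq, PySem.Str.toList_join]
  simp [PySem.Chars.join_nil]

theorem pvJoinNL_cost (ls : List String) :
    PySem.Str.len (PySem.Str.join "\n" ls) = pvCost (ls.map PySem.Str.len) ls.length := by
  cases ls with
  | nil => simpa [pvCost] using pvStr_join_nil "\n"
  | cons a t =>
    rw [pvStr_join_len _ _ (by simp), pvCost]
    simp [List.take_of_length_le]
    ring

theorem pvJoin_pair (sep a b : String) :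
    PySem.Str.join sep [a, b] = a ++ sep ++ b := by
  apply String.toList_inj.mp
  rw [PySem.Str.toList_join]
  simp [PySem.Chars.join_cons_cons, PySem.Chars.join_singleton]

theorem pvCost_succ (lens : List Int) (k : Nat) (hk : k < lens.length) :
    pvCost lens (k + 1) = if k = 0 then pvCost lens k + lens[k] else pvCost lens k + 1 + lens[k] := by
  have ht : lens.take (k+1) = lens.take k ++ [lens[k]] := by
    rw [List.take_add_one]
    simp [List.getElem?_eq_getElem hk]
  rcases Nat.eq_zero_or_pos k with h0 | h0
  · subst h0; simp [pvCost, ht]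
  · have hne : k ≠ 0 := by omega
    simp only [pvCost, ht, List.sum_append, List.sum_cons, List.sum_nil, if_neg hne,
      if_neg (by omega : ¬ k + 1 = 0)]
    push_cast
    ring

theorem pvCost_step (lens : List Int) (h0 : ∀ x ∈ lens, 0 ≤ x) (k : Nat) (hk : k < lens.length) :
    pvCost lens k ≤ pvCost lens (k + 1) := by
  have hx := h0 lens[k] (List.getElem_mem hk)
  rw [pvCost_succ lens k hk]
  split_ifs <;> omega

theorem pvCost_mono (lens : List Int) (h0 : ∀ x ∈ lens, 0 ≤ x) {j k : Nat}
    (hj : j ≤ k) (hk : k ≤ lens.length) : pvCost lens j ≤ pvCost lens k := by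
  induction k, hj using Nat.le_induction with
  | base => exact le_refl _
  | succ k hjk ih =>
    exact le_trans (ih (by omega)) (pvCost_step lens h0 k (by omega))

theorem pvB_scan_cons (limit L : Int) (rest : List Int) (k : Nat) (cost : Int) :
    pvB_scan limit (L :: rest) k cost
      = if limit < (if k = 0 then cost + L else cost + 1 + L) then k
        else pvB_scan limit rest (k + 1) (if k = 0 then cost + L else cost + 1 + L) := rfl

theorem pvScan_spec (limit : Int) (lens : List Int) :
    ∀ (fuel k : Nat), lens.length - k = fuel → k ≤ lens.length → (pvCost lens k ≤ limit ∨ k = 0) →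
      k ≤ pvB_scan limit (lens.drop k) k (pvCost lens k) ∧
      pvB_scan limit (lens.drop k) k (pvCost lens k) ≤ lens.length ∧
      (pvCost lens (pvB_scan limit (lens.drop k) k (pvCost lens k)) ≤ limit ∨
        pvB_scan limit (lens.drop k) k (pvCost lens k) = 0) ∧
      (pvB_scan limit (lens.drop k) k (pvCost lens k) < lens.length →
        limit < pvCost lens (pvB_scan limit (lens.drop k) k (pvCost lens k) + 1)) := by
  intro fuel
  induction fuel with
  | zero =>
    intro k hf hk hc
    have hkl : k = lens.length := by omega
    rw [List.drop_of_length_le (by omega)]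
    refine ⟨le_refl _, by simp [pvB_scan, hkl], by simpa [pvB_scan] using hc, by simp [pvB_scan, hkl]⟩
  | succ fuel ih =>
    intro k hf hk hc
    have hklt : k < lens.length := by omega
    rw [List.drop_eq_getElem_cons hklt, pvB_scan_cons, ← pvCost_succ lens k hklt]
    by_cases hover : limit < pvCost lens (k + 1)
    · rw [if_pos hover]
      exact ⟨le_refl _, by omega, hc, fun _ => hover⟩
    · rw [if_neg hover]
      obtain ⟨h1, h2, h3, h4⟩ := ih (k + 1) (by omega) (by omega) (Or.inl (by omega))
      exact ⟨by omega, h2, h3, h4⟩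

theorem pvScan_eq_findGreatest (limit : Int) (lens : List Int) (h0 : ∀ x ∈ lens, 0 ≤ x) :
    pvB_scan limit lens 0 0 = Nat.findGreatest (fun k => pvCost lens k ≤ limit) lens.length := by
  have h := pvScan_spec limit lens (lens.length - 0) 0 rfl (by omega) (Or.inr rfl)
  have hz : pvCost lens 0 = 0 := by simp [pvCost]
  rw [List.drop_zero, hz] at h
  obtain ⟨-, hle, hfit, hnext⟩ := h
  set r := pvB_scan limit lens 0 0 with hr
  apply le_antisymm
  · rcases hfit with hfit | hzero
    · exact Nat.le_findGreatest hle hfit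
    · omega
  · by_contra hlt
    push_neg at hlt
    set g := Nat.findGreatest (fun k => pvCost lens k ≤ limit) lens.length with hg
    have hgle : g ≤ lens.length := Nat.findGreatest_le lens.length
    have hP : g ≠ 0 → pvCost lens g ≤ limit :=
      ((Nat.findGreatest_eq_iff).mp hg.symm).2.1
    have hrn : r < lens.length := by omega
    have hnx := hnext hrn
    have hmono : pvCost lens (r + 1) ≤ pvCost lens g :=
      pvCost_mono lens h0 (by omega) hgle
    have := hP (by omega)
    omega
theorem pvFindGreatest_congr {P Q : Nat → Prop} [DecidablePred P] [DecidablePred Q] (m : Nat)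
    (h : ∀ k, k ≤ m → (P k ↔ Q k)) : Nat.findGreatest P m = Nat.findGreatest Q m := by
  induction m with
  | zero => rfl
  | succ m ih =>
    rw [Nat.findGreatest_succ, Nat.findGreatest_succ]
    by_cases hp : P (m + 1)
    · rw [if_pos hp, if_pos ((h (m + 1) le_rfl).mp hp)]
    · rw [if_neg hp, if_neg (fun hq => hp ((h (m + 1) le_rfl).mpr hq)),
        ih (fun k hk => h k (by omega))]

theorem pvCost_dropLast (lens : List Int) (j : Nat) (hj : j ≤ lens.length - 1) :
    pvCost lens.dropLast j = pvCost lens j := by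
  unfold pvCost
  rw [List.dropLast_eq_take, List.take_take, Nat.min_eq_left hj]

theorem pvTake_dropLast {α : Type} (ls : List α) (j : Nat) (hj : j ≤ ls.length - 1) :
    ls.dropLast.take j = ls.take j := by
  rw [List.dropLast_eq_take, List.take_take]
  congr 1
  omega

/-- the number of lines A's pop loop keeps -/
def pvM (limit : Int) (lens : List Int) : Nat :=
  if pvCost lens lens.length ≤ limit ∨ lens.length ≤ 3 then lens.length
  else max (Nat.findGreatest (fun k => pvCost lens k ≤ limit) lens.length) 3

theorem pvA_loop_eq_aux (limit : Int) : ∀ (n : Nat) (ls : List String), ls.length = n →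
    pvA_loop limit ls = ls.take (pvM limit (ls.map PySem.Str.len)) := by
  intro n
  induction n using Nat.strong_induction_on with
  | _ n ih =>
    intro ls hlen
    have hJ := pvJoinNL_cost ls
    have hlm : (ls.map PySem.Str.len).length = ls.length := by simp
    rw [pvA_loop]
    by_cases hcond : limit < PySem.Str.len (PySem.Str.join "\n" ls) ∧ 3 < ls.length
    · rw [dif_pos hcond]
      obtain ⟨hover, hgt3⟩ := hcond
      rw [hJ] at hover
      have hdl : ls.dropLast.length = ls.length - 1 := List.length_dropLast
      have hrec := ih (n - 1) (by omega) ls.dropLast (by omega)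
      rw [hrec, List.map_dropLast]
      set lens := ls.map PySem.Str.len with hlens
      rw [← hlm] at hover
      set P : Nat → Prop := fun k => pvCost lens k ≤ limit with hP
      set P' : Nat → Prop := fun k => pvCost lens.dropLast k ≤ limit with hP'
      have hlen' : lens.dropLast.length = lens.length - 1 := List.length_dropLast
      have hiff : ∀ k, k ≤ lens.length - 1 → (P' k ↔ P k) := by
        intro k hk
        simp only [hP, hP', pvCost_dropLast lens k hk]
      have hcongr : Nat.findGreatest P' (lens.length - 1) = Nat.findGreatest P (lens.length - 1) :=
        pvFindGreatest_congr _ hiff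
      have hfull : Nat.findGreatest P lens.length = Nat.findGreatest P (lens.length - 1) := by
        have heq : lens.length = (lens.length - 1) + 1 := by omega
        have hne : ¬ P ((lens.length - 1) + 1) := by
          simp only [hP]
          rw [(by omega : lens.length - 1 + 1 = lens.length)]
          omega
        conv_lhs => rw [heq]
        rw [Nat.findGreatest_succ, if_neg hne]
      have hgle : Nat.findGreatest P (lens.length - 1) ≤ lens.length - 1 :=
        Nat.findGreatest_le _
      -- RHS value of pvM on the full list
      have hMfull : pvM limit lens = max (Nat.findGreatest P lens.length) 3 := by
        rw [pvM, if_neg (by omega)]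
      rw [hMfull]
      -- now compute pvM on the dropLast list, by cases
      by_cases hfit : pvCost lens.dropLast (lens.dropLast.length) ≤ limit
      · -- the shortened list fits: loop stops right there
        have hM' : pvM limit lens.dropLast = lens.length - 1 := by
          rw [pvM, if_pos (Or.inl hfit)]; omega
        have hfit' : P (lens.length - 1) := by
          rw [hlen'] at hfit
          simp only [hP]
          rw [← pvCost_dropLast lens (lens.length - 1) (le_refl _)]
          exact hfit
        have hge : lens.length - 1 ≤ Nat.findGreatest P (lens.length - 1) :=
          Nat.le_findGreatest (le_refl _) hfit'
        have hgeq : Nat.findGreatest P lens.length = lens.length - 1 := by omega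
        rw [hM', hgeq, pvTake_dropLast ls _ (by omega)]
        congr 1
        omega
      · by_cases h3 : lens.dropLast.length ≤ 3
        · have hM' : pvM limit lens.dropLast = lens.length - 1 := by
            rw [pvM, if_pos (Or.inr h3)]; omega
          have hgsmall : Nat.findGreatest P lens.length ≤ 3 := by omega
          have h4 : lens.length = 4 := by omega
          rw [hM', pvTake_dropLast ls _ (by omega)]
          congr 1
          omega
        · have hM' : pvM limit lens.dropLast
              = max (Nat.findGreatest P' (lens.dropLast.length)) 3 := by
            rw [pvM, if_neg (by omega)]
          rw [hM', hlen', hcongr, ← hfull,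
            pvTake_dropLast ls _ (by omega)]
    · rw [dif_neg hcond]
      have : pvM limit (ls.map PySem.Str.len) = ls.length := by
        rw [pvM, if_pos]
        · exact hlm
        · rw [hlm, hJ] at *
          omega
      rw [this, List.take_of_length_le (le_refl _)]

theorem pvSum_joinNL (act : List (List String)) (h : ∀ b ∈ act, b ≠ []) :
    (act.map (fun b => PySem.Str.len (PySem.Str.join "\n" b))).sum
      = ((act.flatMap (fun block => block)).map PySem.Str.len).sum
          + ((act.flatMap (fun block => block)).length : Int) - (act.length : Int) := by
  induction act with
  | nil => simp
  | cons b t ih =>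
    have hb : b ≠ [] := h b (by simp)
    have hlen : PySem.Str.len (PySem.Str.join "\n" b)
        = (b.map PySem.Str.len).sum + ((b.length : Int) - 1) := by
      rw [pvStr_join_len "\n" b hb, (by decide : (("\n".toList.length : Nat) : Int) = 1)]
      ring
    simp only [List.map_cons, List.sum_cons, List.flatMap_cons, List.map_append,
      List.sum_append, List.length_append, List.length_cons,
      ih (fun x hx => h x (by simp [hx]))]
    rw [hlen]
    push_cast
    ring

theorem pvE1 (active : List (List String)) (h : ∀ b ∈ active, b ≠ []) :
    PySem.Str.len (PySem.Str.join "\n\n" (active.map (fun block => PySem.Str.join "\n" block)))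
      = (if (active.length : Int) ≠ 0 then
            ((active.flatMap (fun block => block)).map PySem.Str.len).sum
              + ((active.flatMap (fun block => block)).length : Int) + (active.length : Int) - 2
          else 0) := by
  cases hact : active with
  | nil => simp
  | cons b t =>
    rw [← hact]
    have hne : active ≠ [] := by rw [hact]; exact List.cons_ne_nil _ _
    rw [if_pos (by rw [hact]; simp only [List.length_cons]; push_cast; omega),
      pvStr_join_len "\n\n" _ (by rw [hact]; simp)]
    have h2 : (("\n\n".toList.length : Nat) : Int) = 2 := by decide
    rw [h2, List.map_map]
    have := pvSum_joinNL active h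
    simp only [Function.comp_def] at *
    rw [this, List.length_map]
    ring

theorem pvE2 (CL : List String) :
    PySem.Str.len (PySem.Str.join "\n" CL)
      = (if (CL.length : Int) ≠ 0 then
            (CL.map PySem.Str.len).sum + (CL.length : Int) - 1
          else 0) := by
  rw [pvJoinNL_cost, pvCost]
  cases CL with
  | nil => simp
  | cons a t =>
    rw [if_neg (by simp), if_pos (by simp only [List.length_cons]; push_cast; omega),
      List.take_of_length_le (by simp)]

theorem pvLens_nonneg (CL : List String) : ∀ x ∈ CL.map PySem.Str.len, 0 ≤ x := by
  intro x hx
  obtain ⟨ln, -, rfl⟩ := List.mem_map.mp hx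
  rw [PySem.Str.len_eq]
  exact Int.natCast_nonneg _

theorem pvStage4 (limit : Int) (CL : List String)
    (h2 : ¬ PySem.Str.len (PySem.Str.join "\n" CL) ≤ limit) :
    (if PySem.Str.len (PySem.Str.join "\n" (pvA_loop limit CL)) ≤ limit then
        PySem.Str.join "\n" (pvA_loop limit CL)
      else
        PySem.Str.rstrip (PySem.Str.slice (PySem.Str.join "\n" (pvA_loop limit CL)) none
          (some (max 0 (limit - 3)))) ++ "...")
    = (if PySem.Str.len (PySem.Str.join "\n" (PySem.List.slice CL none
          (some (if (CL.length : Int) ≤ 3 then (CL.length : Int)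
                 else max ((pvB_scan limit (CL.map PySem.Str.len) 0 0 : Nat) : Int) 3)))) ≤ limit then
        PySem.Str.join "\n" (PySem.List.slice CL none
          (some (if (CL.length : Int) ≤ 3 then (CL.length : Int)
                 else max ((pvB_scan limit (CL.map PySem.Str.len) 0 0 : Nat) : Int) 3)))
      else
        PySem.Str.rstrip (PySem.Str.slice (PySem.Str.join "\n" (PySem.List.slice CL none
          (some (if (CL.length : Int) ≤ 3 then (CL.length : Int)
                 else max ((pvB_scan limit (CL.map PySem.Str.len) 0 0 : Nat) : Int) 3)))) none
          (some (max 0 (limit - 3)))) ++ "...") := by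
  suffices h : pvA_loop limit CL = PySem.List.slice CL none
      (some (if (CL.length : Int) ≤ 3 then (CL.length : Int)
             else max ((pvB_scan limit (CL.map PySem.Str.len) 0 0 : Nat) : Int) 3)) by
    rw [h]
  have h0 := pvLens_nonneg CL
  have hcost : limit < pvCost (CL.map PySem.Str.len) CL.length := by
    rw [pvJoinNL_cost] at h2
    omega
  have hm0 : 0 ≤ (if (CL.length : Int) ≤ 3 then (CL.length : Int)
      else max ((pvB_scan limit (CL.map PySem.Str.len) 0 0 : Nat) : Int) 3) := by
    split_ifs <;> omega
  rw [PySem.List.slice_to CL hm0, pvA_loop_eq_aux limit CL.length CL rfl]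
  congr 1
  rw [pvScan_eq_findGreatest limit _ h0, pvM]
  have hlm : (CL.map PySem.Str.len).length = CL.length := by simp
  by_cases hn3 : CL.length ≤ 3
  · rw [if_pos (Or.inr (by omega)), if_pos (by exact_mod_cast hn3)]
    simp
  · rw [if_neg (by rw [hlm]; omega), if_neg (by omega)]
    rw [hlm]
    omega

theorem pv_core (limit : Int) (AB : List (List String)) (hblk : ∀ b ∈ AB, b ≠ []) :
    (if PySem.Str.len (PySem.Str.join "\n\n" (AB.map (fun block => PySem.Str.join "\n" block))) ≤ limit then
       PySem.Str.join "\n\n" (AB.map (fun block => PySem.Str.join "\n" block))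
     else if PySem.Str.len (PySem.Str.join "\n" (AB.flatMap (fun block => block))) ≤ limit then
       PySem.Str.join "\n" (AB.flatMap (fun block => block))
     else if AB ≠ [] ∧ 3 ≤ (AB.length : Int) ∧ PySem.Str.len (PySem.Str.join "\n\n" ((PySem.List.slice AB none (some 2)).map (fun block => PySem.Str.join "\n" block))) ≤ limit then
       PySem.Str.join "\n\n" ((PySem.List.slice AB none (some 2)).map (fun block => PySem.Str.join "\n" block))
     else if PySem.Str.len (PySem.Str.join "\n" (pvA_loop limit (AB.flatMap (fun block => block)))) ≤ limit then
       PySem.Str.join "\n" (pvA_loop limit (AB.flatMap (fun block => block)))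
     else
       PySem.Str.rstrip (PySem.Str.slice (PySem.Str.join "\n" (pvA_loop limit (AB.flatMap (fun block => block)))) none (some (max 0 (limit - 3)))) ++ "...")
    =
    (if (if (AB.length : Int) ≠ 0 then ((AB.flatMap (fun block => block)).map PySem.Str.len).sum + ((AB.flatMap (fun block => block)).length : Int) + (AB.length : Int) - 2 else 0) ≤ limit then
       PySem.Str.join "\n\n" (AB.map (fun block => PySem.Str.join "\n" block))
     else if (if ((AB.flatMap (fun block => block)).length : Int) ≠ 0 then ((AB.flatMap (fun block => block)).map PySem.Str.len).sum + ((AB.flatMap (fun block => block)).length : Int) - 1 else 0) ≤ limit then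
       PySem.Str.join "\n" (AB.flatMap (fun block => block))
     else if 3 ≤ (AB.length : Int) ∧ (PySem.List.slice ((AB.flatMap (fun block => block)).map PySem.Str.len) none (some (((((PySem.List.pyGet? AB 0).getD []).length + ((PySem.List.pyGet? AB 1).getD []).length : Nat) : Int)))).sum + (((((PySem.List.pyGet? AB 0).getD []).length + ((PySem.List.pyGet? AB 1).getD []).length : Nat) : Int)) ≤ limit then
       PySem.Str.join "\n" ((PySem.List.pyGet? AB 0).getD []) ++ "\n\n" ++ PySem.Str.join "\n" ((PySem.List.pyGet? AB 1).getD [])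
     else if PySem.Str.len (PySem.Str.join "\n" (PySem.List.slice (AB.flatMap (fun block => block)) none (some (if ((AB.flatMap (fun block => block)).length : Int) ≤ 3 then ((AB.flatMap (fun block => block)).length : Int) else max ((pvB_scan limit ((AB.flatMap (fun block => block)).map PySem.Str.len) 0 0 : Nat) : Int) 3)))) ≤ limit then
       PySem.Str.join "\n" (PySem.List.slice (AB.flatMap (fun block => block)) none (some (if ((AB.flatMap (fun block => block)).length : Int) ≤ 3 then ((AB.flatMap (fun block => block)).length : Int) else max ((pvB_scan limit ((AB.flatMap (fun block => block)).map PySem.Str.len) 0 0 : Nat) : Int) 3)))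
     else
       PySem.Str.rstrip (PySem.Str.slice (PySem.Str.join "\n" (PySem.List.slice (AB.flatMap (fun block => block)) none (some (if ((AB.flatMap (fun block => block)).length : Int) ≤ 3 then ((AB.flatMap (fun block => block)).length : Int) else max ((pvB_scan limit ((AB.flatMap (fun block => block)).map PySem.Str.len) 0 0 : Nat) : Int) 3)))) none (some (max 0 (limit - 3)))) ++ "...") := by
  rw [pvE1 AB hblk, pvE2 (AB.flatMap (fun block => block))]
  by_cases h1 : (if (AB.length : Int) ≠ 0 then
      ((AB.flatMap (fun block => block)).map PySem.Str.len).sum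
        + ((AB.flatMap (fun block => block)).length : Int) + (AB.length : Int) - 2
    else 0) ≤ limit
  · rw [if_pos h1, if_pos h1]
  · rw [if_neg h1, if_neg h1]
    by_cases h2 : (if ((AB.flatMap (fun block => block)).length : Int) ≠ 0 then
        ((AB.flatMap (fun block => block)).map PySem.Str.len).sum
          + ((AB.flatMap (fun block => block)).length : Int) - 1
      else 0) ≤ limit
    · rw [if_pos h2, if_pos h2]
    · rw [if_neg h2, if_neg h2]
      have h2' : ¬ PySem.Str.len (PySem.Str.join "\n" (AB.flatMap (fun block => block))) ≤ limit := by
        rw [pvE2]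
        exact h2
      by_cases h3 : 3 ≤ (AB.length : Int)
      · have h3' : 3 ≤ AB.length := by exact_mod_cast h3
        obtain ⟨b0, b1, rest, hshape⟩ : ∃ b0 b1 rest, AB = b0 :: b1 :: rest := by
          cases AB with
          | nil => simp at h3'
          | cons a t =>
            cases t with
            | nil => simp at h3'
            | cons c u => exact ⟨a, c, u, rfl⟩
        rw [hshape] at hblk h2' ⊢
        have hb0 : b0 ≠ [] := hblk b0 (by simp)
        have hb1 : b1 ≠ [] := hblk b1 (by simp)
        have hslice : PySem.List.slice (b0 :: b1 :: rest) none (some (2 : Int)) = [b0, b1] := by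
          rw [PySem.List.slice_to _ (by norm_num)]
          rfl
        have hget0 : (PySem.List.pyGet? (b0 :: b1 :: rest) 0).getD [] = b0 := by
          simp [PySem.List.pyGet?, PySem.List.pyIdx?,
            show ((0 : Int) ≤ (rest.length : Int) + 1) by positivity]
        have hget1 : (PySem.List.pyGet? (b0 :: b1 :: rest) 1).getD [] = b1 := by
          simp [PySem.List.pyGet?, PySem.List.pyIdx?]
        rw [hslice, hget0, hget1]
        have hTake : PySem.List.slice (((b0 :: b1 :: rest).flatMap (fun block => block)).map PySem.Str.len)
            none (some ((b0.length + b1.length : Nat) : Int))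
            = (b0.map PySem.Str.len) ++ (b1.map PySem.Str.len) := by
          rw [PySem.List.slice_to_natCast]
          rw [List.flatMap_cons, List.flatMap_cons, ← List.append_assoc, List.map_append]
          rw [List.take_left' (by simp)]
          exact List.map_append ..
        have hXeq : PySem.Str.len (PySem.Str.join "\n\n"
              ([b0, b1].map (fun block => PySem.Str.join "\n" block)))
            = (PySem.List.slice (((b0 :: b1 :: rest).flatMap (fun block => block)).map PySem.Str.len)
                none (some ((b0.length + b1.length : Nat) : Int))).sum
              + ((b0.length + b1.length : Nat) : Int) := by
          rw [hTake, List.sum_append]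
          simp only [List.map_cons, List.map_nil]
          rw [pvStr_join_len "\n\n" _ (by simp)]
          have hj0 := pvStr_join_len "\n" b0 hb0
          have hj1 := pvStr_join_len "\n" b1 hb1
          have hs1 : (("\n".toList.length : Nat) : Int) = 1 := by decide
          have hs2 : (("\n\n".toList.length : Nat) : Int) = 2 := by decide
          rw [hs1] at hj0 hj1
          simp only [List.map_cons, List.map_nil, List.sum_cons, List.sum_nil, List.length_cons,
            List.length_nil, hj0, hj1, hs2]
          push_cast
          ring
        have hcond : ((b0 :: b1 :: rest) ≠ [] ∧ 3 ≤ ((b0 :: b1 :: rest).length : Int) ∧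
              PySem.Str.len (PySem.Str.join "\n\n"
                ([b0, b1].map (fun block => PySem.Str.join "\n" block))) ≤ limit)
            ↔ (3 ≤ ((b0 :: b1 :: rest).length : Int) ∧
              (PySem.List.slice (((b0 :: b1 :: rest).flatMap (fun block => block)).map PySem.Str.len)
                none (some ((b0.length + b1.length : Nat) : Int))).sum
                + ((b0.length + b1.length : Nat) : Int) ≤ limit) := by
          constructor
          · rintro ⟨-, hn, hx⟩
            rw [hXeq] at hx
            exact ⟨hn, hx⟩
          · rintro ⟨hn, hx⟩
            exact ⟨List.cons_ne_nil _ _, hn, by rw [hXeq]; exact hx⟩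
        refine if_congr hcond ?_ (pvStage4 limit _ h2')
        simp only [List.map_cons, List.map_nil]
        exact pvJoin_pair "\n\n" _ _
      · rw [if_neg (fun hc : AB ≠ [] ∧ 3 ≤ (AB.length : Int) ∧ _ => h3 hc.2.1),
          if_neg (fun hc : 3 ≤ (AB.length : Int) ∧ _ => h3 hc.1)]
        exact pvStage4 limit _ h2'

set_option maxHeartbeats 2000000 in
theorem pv_main (blocks : List (List String)) (limit : Int) :
    truncate_blocks_py blocks limit = truncate_blocks_py_alt blocks limit := by
  have hblk : ∀ b ∈ (blocks.map (fun block => block.filter (fun line => line ≠ ""))).filter (fun block => block ≠ []), b ≠ [] := by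
    intro b hb
    simpa using (List.mem_filter.mp hb).2
  have h := pv_core limit
    ((blocks.map (fun block => block.filter (fun line => line ≠ ""))).filter (fun block => block ≠ []))
    hblk
  simp only [truncate_blocks_py, truncate_blocks_py_alt]
  exact h

-- ===== VERDICT (by name: the statement is the Claim_ definition above) =====
theorem truncate_blocks_py_spec : Claim_equal_truncate_blocks_py := by
  intro blocks limit _
  show truncate_blocks_py blocks limit = truncate_blocks_py_alt blocks limit
  exact pv_main blocks limit
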